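-- pv_equiv track=rewrite | github.com/octolo/mighty | functions/__init__.py | format_non_alpha
-- ===== SOURCE A (Python) =====
-- def format_non_alpha(text):
--     for ch in [
--         '\\',
--         '`',
--         '*',
--         '_',
--         '{',
--         '}',
--         '[',
--         ']',
--         '(',
--         ')',
--         '>',
--         '#',
--         '+',
--         '-',
--         '.',
--         '!',
--         '$',
--         "'",
--     ]:
--         if ch in text:
--             text = text.replace(ch, '-')
--     return text
-- ===== SOURCE B (Python) =====
-- SPECIALS = frozenset('\\`*_{}[]()>#+-.!$\'')
--
-- def format_non_alpha(text):
--     return ''.join('-' if c in SPECIALS else c for c in text)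
-- ===== Notes on version B (the rewrite author's own statement) =====
-- stated objective: simpler
-- what changed: Replaces A's 18-pass loop of membership-test + str.replace with a single pass over the characters that emits a dash for any character in a fixed set, joined into the result.
import Mathlib
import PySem

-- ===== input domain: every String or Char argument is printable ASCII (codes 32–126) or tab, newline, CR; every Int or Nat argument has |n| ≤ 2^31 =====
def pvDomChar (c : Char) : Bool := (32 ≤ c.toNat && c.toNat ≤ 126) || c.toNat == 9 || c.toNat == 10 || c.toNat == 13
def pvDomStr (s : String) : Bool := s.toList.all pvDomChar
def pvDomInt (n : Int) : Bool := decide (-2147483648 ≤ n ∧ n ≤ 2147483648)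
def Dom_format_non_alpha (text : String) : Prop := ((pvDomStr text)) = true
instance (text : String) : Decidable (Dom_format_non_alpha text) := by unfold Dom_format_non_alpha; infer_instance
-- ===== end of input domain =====

-- B replaces A's 18 sequential str.replace passes with one pass that maps each special character to a dash (objective: simpler).


-- ===== PORT A =====
-- the 18 special characters, in A's order (each Python list element is a one-char string)
def fnaChars : List Char :=
  ['\\', '`', '*', '_', '{', '}', '[', ']', '(', ')', '>', '#', '+', '-', '.', '!', '$', '\'']

-- for ch in [...]: if ch in text: text = text.replace(ch, '-')
def format_non_alpha (text : String) : String :=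
  fnaChars.foldl
    (fun t ch =>
      if PySem.Str.isIn (String.singleton ch) t then PySem.Str.replace t (String.singleton ch) "-" else t)
    text

-- ===== PORT B =====
def fnaSpecials : PySem.Set Char := PySem.Set.ofList fnaChars

-- ''.join('-' if c in SPECIALS else c for c in text)
def format_non_alpha_alt (text : String) : String :=
  String.ofList (text.toList.map (fun c => if PySem.Set.contains fnaSpecials c then '-' else c))

-- ===== PRECONDITION & SPEC =====
def Spec_format_non_alpha (text : String) (out : String) : Prop := out = format_non_alpha_alt text
instance (text : String) (out : String) : Decidable (Spec_format_non_alpha text out) := by unfold Spec_format_non_alpha; infer_instance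

-- ===== CLAIM (what is proved, stated in full; the proofs are below) =====
def Claim_equal_format_non_alpha : Prop := ∀ (text : String), Dom_format_non_alpha text → Spec_format_non_alpha text (format_non_alpha text)

-- ===== LEMMAS AND PROOFS =====

-- single-char replace, characterised: it is a map
theorem fna_go_single (c d : Char) :
    ∀ (fuel : Nat) (l acc : List Char), l.length ≤ fuel →
      PySem.Chars.replace.go [c] [d] fuel l acc
        = acc.reverse ++ l.map (fun x => if x = c then d else x) := by
  intro fuel
  induction fuel with
  | zero =>
      intro l acc h
      have : l = [] := List.eq_nil_of_length_eq_zero (Nat.le_zero.mp h)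
      subst this
      simp [PySem.Chars.replace.go]
  | succ n ih =>
      intro l acc h
      cases l with
      | nil => simp [PySem.Chars.replace.go]
      | cons x t =>
          have hlen : t.length ≤ n := by simpa using Nat.le_of_succ_le_succ h
          by_cases hx : x = c
          · subst hx
            simp [PySem.Chars.replace.go, List.isPrefixOf, ih t _ hlen]
          · simp [PySem.Chars.replace.go, List.isPrefixOf, Ne.symm hx, ih t _ hlen, hx]

theorem fna_replace_single (c d : Char) (l : List Char) :
    PySem.Chars.replace l [c] [d] = l.map (fun x => if x = c then d else x) := by
  simp only [PySem.Chars.replace, List.isEmpty_cons, if_neg Bool.false_ne_true]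
  simpa using fna_go_single c d l.length l [] (le_refl _)

theorem fna_isIn_single (c : Char) (l : List Char) :
    PySem.Chars.isIn [c] l = true ↔ c ∈ l := by
  rw [PySem.Chars.isIn_iff_infix]
  constructor
  · intro h; exact h.mem (by simp)
  · intro h
    obtain ⟨s, t, rfl⟩ := List.append_of_mem h
    exact ⟨s, t, by simp⟩

-- one step of A's loop, on the character list
theorem fna_step (ch : Char) (t : String) :
    (if PySem.Str.isIn (String.singleton ch) t then PySem.Str.replace t (String.singleton ch) "-" else t).toList
      = t.toList.map (fun x => if x = ch then '-' else x) := by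
  by_cases h : PySem.Chars.isIn [ch] t.toList = true
  · rw [if_pos (by simpa [PySem.Str.isIn_eq] using h)]
    rw [PySem.Str.toList_replace]
    simpa using fna_replace_single ch '-' t.toList
  · rw [if_neg (by simpa [PySem.Str.isIn_eq] using h)]
    have hmem : ch ∉ t.toList := fun hm => h ((fna_isIn_single ch t.toList).mpr hm)
    symm
    calc t.toList.map (fun x => if x = ch then '-' else x)
        = t.toList.map id := List.map_congr_left (fun x hx => if_neg (fun (hxe : x = ch) => hmem (hxe ▸ hx)))
      _ = t.toList := List.map_id _

-- A's whole fold over any character list L collapses to one map ('-' is a fixed point of every step)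
theorem fna_fold (L : List Char) :
    ∀ (t : String),
      (L.foldl
        (fun t ch =>
          if PySem.Str.isIn (String.singleton ch) t then PySem.Str.replace t (String.singleton ch) "-" else t)
        t).toList
      = t.toList.map (fun c => if c ∈ L then '-' else c) := by
  induction L with
  | nil => intro t; simp
  | cons x L ih =>
      intro t
      rw [List.foldl_cons, ih, fna_step, List.map_map]
      apply List.map_congr_left
      intro c _
      by_cases hc : c = x
      · subst hc; by_cases h : c ∈ L <;> simp [h]
      · by_cases h : c ∈ L <;> simp [Function.comp, hc, h]

-- ===== VERDICT (by name: the statement is the Claim_ definition above) =====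
theorem format_non_alpha_spec : Claim_equal_format_non_alpha := by
  intro text _
  unfold Spec_format_non_alpha
  apply String.toList_injective
  unfold format_non_alpha format_non_alpha_alt
  rw [fna_fold, String.toList_ofList]
  apply List.map_congr_left
  intro c _
  by_cases hc : c ∈ fnaChars
  · simp [hc, fnaSpecials, PySem.Set.mem_ofList]
  · simp [hc, fnaSpecials, PySem.Set.mem_ofList]
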